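-- pv_equiv track=rewrite | github.com/bc-writings/drafts | math/arithmetic/product-cons-int-&-int-square-near-to-ai/coding/common.py | find_pb_sftabs_recu
-- ===== SOURCE A (Python) =====
-- def prod_of(sftab_1, sftab_2):
--     prod = [
--         a * b
--         for a, b in zip(sftab_1, sftab_2)
--     ]
--
--     return prod
--
-- def find_pb_sftabs_recu(nbfactors, partial_sftabs, kprimes):
--     if len(partial_sftabs) == 1:
--         return partial_sftabs[0]
--
--     all_prods = []
--
--     for sftab_1 in partial_sftabs[0]:
--         for sftab_2 in find_pb_sftabs_recu(
--             nbfactors,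
--             partial_sftabs[1:],
--             kprimes
--         ):
--             all_prods.append(prod_of(sftab_1, sftab_2))
--
--     return all_prods
-- ===== SOURCE B (Python) =====
-- def prod_of(sftab_1, sftab_2):
--     prod = [
--         a * b
--         for a, b in zip(sftab_1, sftab_2)
--     ]
--
--     return prod
--
-- def find_pb_sftabs_recu(nbfactors, partial_sftabs, kprimes):
--     acc = partial_sftabs[-1]
--     for group in reversed(partial_sftabs[:-1]):
--         acc = [prod_of(a, b) for a in group for b in acc]
--     return acc
-- ===== Notes on version B (the rewrite author's own statement) =====
-- stated objective: alternative
-- what changed: Replaces the top-down recursion that re-evaluates the recursive call once per element of the outer group with a single iterative right-fold over the groups, building the product bottom-up and computing each level exactly once.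
import Mathlib
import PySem

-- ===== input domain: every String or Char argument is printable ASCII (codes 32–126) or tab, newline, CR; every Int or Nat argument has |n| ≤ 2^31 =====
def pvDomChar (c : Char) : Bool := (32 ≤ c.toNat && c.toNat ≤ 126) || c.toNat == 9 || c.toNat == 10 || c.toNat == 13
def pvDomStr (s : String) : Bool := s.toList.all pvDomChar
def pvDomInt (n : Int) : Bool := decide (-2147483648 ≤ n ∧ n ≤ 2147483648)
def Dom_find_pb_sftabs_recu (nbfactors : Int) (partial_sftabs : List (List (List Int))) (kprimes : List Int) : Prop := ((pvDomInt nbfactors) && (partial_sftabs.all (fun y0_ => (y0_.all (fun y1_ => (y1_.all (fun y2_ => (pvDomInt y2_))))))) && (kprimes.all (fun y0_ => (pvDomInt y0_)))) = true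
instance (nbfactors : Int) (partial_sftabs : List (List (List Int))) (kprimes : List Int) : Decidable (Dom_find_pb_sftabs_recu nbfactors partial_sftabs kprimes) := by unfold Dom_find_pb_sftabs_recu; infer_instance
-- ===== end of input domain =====

-- B replaces A's top-down recursion with a single iterative right-fold over the groups,
-- building the Cartesian elementwise-product bottom-up (an alternative decomposition).

-- ===== PORT A =====
-- prod_of: elementwise product via zip
def prodOf (sftab_1 sftab_2 : List Int) : List Int :=
  (sftab_1.zip sftab_2).map (fun ab => ab.1 * ab.2)

def find_pb_sftabs_recu (nbfactors : Int) (partial_sftabs : List (List (List Int))) (kprimes : List Int) : List (List Int) :=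
  match partial_sftabs with
  | [] => []          -- Python raises IndexError here; excluded by Pre_
  | [s] => s          -- len(partial_sftabs) == 1
  | g :: rest =>
    -- for sftab_1 in partial_sftabs[0]: for sftab_2 in recursive call: all_prods.append(...)
    g.foldl (fun all_prods sftab_1 =>
      (find_pb_sftabs_recu nbfactors rest kprimes).foldl
        (fun acc sftab_2 => acc ++ [prodOf sftab_1 sftab_2]) all_prods) []

-- ===== PORT B =====
def find_pb_sftabs_recu_alt (nbfactors : Int) (partial_sftabs : List (List (List Int))) (kprimes : List Int) : List (List Int) :=
  match partial_sftabs.getLast? with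
  | none => []        -- partial_sftabs[-1] raises IndexError; excluded by Pre_
  | some last =>
    -- for group in reversed(partial_sftabs[:-1]): acc = [prod_of(a,b) for a in group for b in acc]
    (partial_sftabs.dropLast.reverse).foldl
      (fun acc group => group.flatMap (fun a => acc.map (fun b => prodOf a b))) last

-- ===== PRECONDITION & SPEC =====
-- Pre_ excludes only the empty list, on which both Pythons raise IndexError.
def Pre_find_pb_sftabs_recu (nbfactors : Int) (partial_sftabs : List (List (List Int))) (kprimes : List Int) : Prop :=
  partial_sftabs ≠ []
instance (nbfactors : Int) (partial_sftabs : List (List (List Int))) (kprimes : List Int) : Decidable (Pre_find_pb_sftabs_recu nbfactors partial_sftabs kprimes) := by unfold Pre_find_pb_sftabs_recu; infer_instance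

def pvWitness_find_pb_sftabs_recu : Int × List (List (List Int)) × List Int :=
  (2, [[[1, 2], [3, 4]], [[5, 6]]], [2, 3])

def Spec_find_pb_sftabs_recu (nbfactors : Int) (partial_sftabs : List (List (List Int))) (kprimes : List Int) (out : List (List Int)) : Prop := out = find_pb_sftabs_recu_alt nbfactors partial_sftabs kprimes
instance (nbfactors : Int) (partial_sftabs : List (List (List Int))) (kprimes : List Int) (out : List (List Int)) : Decidable (Spec_find_pb_sftabs_recu nbfactors partial_sftabs kprimes out) := by unfold Spec_find_pb_sftabs_recu; infer_instance

-- ===== CLAIM (what is proved, stated in full; the proofs are below) =====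
def Claim_equal_find_pb_sftabs_recu : Prop := ∀ (nbfactors : Int) (partial_sftabs : List (List (List Int))) (kprimes : List Int), Dom_find_pb_sftabs_recu nbfactors partial_sftabs kprimes → Pre_find_pb_sftabs_recu nbfactors partial_sftabs kprimes → Spec_find_pb_sftabs_recu nbfactors partial_sftabs kprimes (find_pb_sftabs_recu nbfactors partial_sftabs kprimes)

-- ===== LEMMAS AND PROOFS =====

-- inner loop of A: appending one product per element is map
lemma foldl_append_map (R : List (List Int)) (s1 : List Int) (init : List (List Int)) :
    R.foldl (fun acc s2 => acc ++ [prodOf s1 s2]) init = init ++ R.map (fun s2 => prodOf s1 s2) := by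
  induction R generalizing init with
  | nil => simp
  | cons h t ih => simp [List.foldl, ih]

-- outer loop of A is a flatMap
lemma foldl_outer_flatMap (g : List (List Int)) (R : List (List Int)) (init : List (List Int)) :
    g.foldl (fun all_prods s1 =>
      R.foldl (fun acc s2 => acc ++ [prodOf s1 s2]) all_prods) init
    = init ++ g.flatMap (fun s1 => R.map (fun s2 => prodOf s1 s2)) := by
  induction g generalizing init with
  | nil => simp
  | cons h t ih => rw [List.foldl_cons, foldl_append_map, ih]; simp [List.flatMap]

-- B satisfies the same recurrence as A on a list of length ≥ 2
lemma alt_cons (nb : Int) (kp : List Int) (g : List (List Int)) (rest : List (List (List Int)))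
    (hr : rest ≠ []) :
    find_pb_sftabs_recu_alt nb (g :: rest) kp
    = g.flatMap (fun a => (find_pb_sftabs_recu_alt nb rest kp).map (fun b => prodOf a b)) := by
  cases rest with
  | nil => exact absurd rfl hr
  | cons g2 t =>
    obtain ⟨l, hl⟩ : ∃ l, (g2 :: t).getLast? = some l := by
      cases h : (g2 :: t).getLast? with
      | none => exact absurd (List.getLast?_eq_none_iff.mp h) (by simp)
      | some l => exact ⟨l, rfl⟩
    unfold find_pb_sftabs_recu_alt
    rw [List.getLast?_cons_cons, hl]
    simp [List.foldl_append]

theorem find_pb_sftabs_recu_eq (nb : Int) (kp : List Int) :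
    ∀ ps : List (List (List Int)), ps ≠ [] →
      find_pb_sftabs_recu nb ps kp = find_pb_sftabs_recu_alt nb ps kp := by
  intro ps
  induction ps with
  | nil => intro h; exact absurd rfl h
  | cons g rest ih =>
    intro _
    cases rest with
    | nil => simp [find_pb_sftabs_recu, find_pb_sftabs_recu_alt]
    | cons g2 t =>
      have hr : (g2 :: t) ≠ ([] : List (List (List Int))) := by simp
      rw [show find_pb_sftabs_recu nb (g :: g2 :: t) kp
          = g.foldl (fun all_prods s1 =>
              (find_pb_sftabs_recu nb (g2 :: t) kp).foldl
                (fun acc s2 => acc ++ [prodOf s1 s2]) all_prods) [] from rfl,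
        foldl_outer_flatMap, alt_cons nb kp g (g2 :: t) hr, ih hr]
      simp

-- ===== VERDICT (by name: the statement is the Claim_ definition above) =====
theorem find_pb_sftabs_recu_spec : Claim_equal_find_pb_sftabs_recu := by
  intro nb ps kp _ hpre
  exact find_pb_sftabs_recu_eq nb kp ps hpre
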